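-- pv_equiv track=rewrite | github.com/heeeoneee/cue_sheet_checker | make_individual_sheets.py | fill_data_down_all_columns
-- ===== SOURCE A (Python) =====
-- def fill_data_down_all_columns(data_rows):
--     """
--     주어진 2D 리스트(테이블 데이터)에서 각 열의 빈 셀을 바로 위 행의 같은 열 값으로 채워 넣습니다.
--     스프레드시트의 병합 해제 시뮬레이션에 유용합니다.
--     """
--     if not data_rows:
--         return []
--
--     # 원본 데이터 수정 방지를 위해 깊은 복사 (리스트의 리스트)
--     processed_data = [list(row) for row in data_rows]
--
--     # 모든 행이 동일한 길이를 가지도록 최대 열 수를 기준으로 확장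
--     max_cols = max(len(row) for row in processed_data)
--     for r_idx in range(len(processed_data)):
--         while len(processed_data[r_idx]) < max_cols:
--             processed_data[r_idx].append("") # 빈 문자열로 채워 길이 맞춤
--
--     # 각 열별로 마지막으로 채워진 값을 저장할 리스트
--     # 첫 행의 값이 0이거나 빈 문자열인 경우를 대비해 None으로 초기화
--     last_filled_values = [None] * max_cols
--
--     for r_idx, row in enumerate(processed_data):
--         for c_idx in range(max_cols):
--             current_cell_value = row[c_idx].strip() # 현재 셀 값 (공백 제거)
--
--             if current_cell_value: # 현재 셀에 값이 있으면
--                 last_filled_values[c_idx] = current_cell_value # 이 값을 '마지막 채워진 값'으로 업데이트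
--             elif last_filled_values[c_idx] is not None: # 현재 셀이 비어있고, 이전에 채워진 값이 있다면
--                 row[c_idx] = last_filled_values[c_idx] # 이전 값으로 현재 셀을 채움
--             # 만약 현재 셀이 비어있고, 'last_filled_values[c_idx]'도 None이면 (예: 해당 열의 첫 행부터 비어있는 경우),
--             # 해당 셀은 비워둔 채로 유지됩니다.
--
--         processed_data[r_idx] = row # 수정된 행을 다시 할당
--
--     return processed_data
-- ===== SOURCE B (Python) =====
-- def fill_data_down_all_columns(data_rows):
--     if not data_rows:
--         return []
--     max_cols = max(len(row) for row in data_rows)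
--     grid = [list(row) + [""] * (max_cols - len(row)) for row in data_rows]
--     n_rows = len(grid)
--     new_cols = []
--     for c in range(max_cols):
--         last = None
--         filled = []
--         for r in range(n_rows):
--             cell = grid[r][c]
--             s = cell.strip()
--             if s:
--                 last = s
--                 filled.append(cell)
--             elif last is not None:
--                 filled.append(last)
--             else:
--                 filled.append(cell)
--         new_cols.append(filled)
--     return [[new_cols[c][r] for c in range(max_cols)] for r in range(n_rows)]
-- ===== Notes on version B (the rewrite author's own statement) =====
-- stated objective: alternative
-- what changed: B replaces A's row-major scan over a per-column array of last-seen values with a column-by-column pass carrying one scalar 'last' per column, building filled columns and reassembling rows.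
import Mathlib
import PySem

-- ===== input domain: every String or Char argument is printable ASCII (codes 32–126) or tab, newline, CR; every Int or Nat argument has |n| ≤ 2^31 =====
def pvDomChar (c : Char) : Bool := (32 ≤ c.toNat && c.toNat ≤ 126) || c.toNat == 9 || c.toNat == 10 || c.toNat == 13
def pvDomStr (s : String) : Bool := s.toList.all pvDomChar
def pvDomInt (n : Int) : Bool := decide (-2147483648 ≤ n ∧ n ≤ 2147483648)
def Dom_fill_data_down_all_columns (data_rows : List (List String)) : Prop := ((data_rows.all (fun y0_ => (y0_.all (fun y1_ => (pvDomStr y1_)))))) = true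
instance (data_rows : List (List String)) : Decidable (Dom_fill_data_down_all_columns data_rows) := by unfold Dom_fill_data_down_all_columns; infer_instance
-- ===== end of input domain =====

-- B fills each column with a single scalar carry in a top-down pass per column (instead of A's
-- row-major scan over an array of per-column carries); same values, alternative decomposition.

-- ===== PORT A =====
-- one step of A's inner loop at column c: (new cell value, new last_filled_values[c])
def pvAStep (cell : String) (lc : Option String) : String × Option String :=
  let s := PySem.Str.strip cell
  if s ≠ "" then (cell, some s)
  else match lc with
    | some v => (v, some v)
    | none => (cell, none)

-- A's inner 'for c_idx in range(max_cols)' loop: walks the row and last_filled_values in parallel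
-- (row[c] and last_filled_values[c] are read/written only at the current c, so the index loop is
-- exactly this parallel recursion; the lists always have equal length max_cols)
def pvARow : List String → List (Option String) → List String × List (Option String)
  | [], _ => ([], [])
  | _ :: _, [] => ([], [])
  | cell :: cells, lc :: lcs =>
    let st := pvAStep cell lc
    let rest := pvARow cells lcs
    (st.1 :: rest.1, st.2 :: rest.2)

-- A's outer 'for r_idx, row in enumerate(processed_data)' loop, threading last_filled_values
def pvARows : List (List String) → List (Option String) → List (List String)
  | [], _ => []
  | row :: rest, last =>
    let p := pvARow row last
    p.1 :: pvARows rest p.2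

def fill_data_down_all_columns (data_rows : List (List String)) : List (List String) :=
  if data_rows = [] then []
  else
    -- max(len(row) for row in processed_data)
    let maxCols := (data_rows.map List.length).foldl max 0
    -- the while-append padding loop: append "" until length = maxCols
    let grid := data_rows.map (fun row => row ++ List.replicate (maxCols - row.length) "")
    pvARows grid (List.replicate maxCols none)

-- ===== PORT B =====
-- B's inner 'for r in range(n_rows)' loop over one column, carrying the scalar `last`
def pvFillCol : Option String → List String → List String
  | _, [] => []
  | last, cell :: rest =>
    let s := PySem.Str.strip cell
    if s ≠ "" then cell :: pvFillCol (some s) rest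
    else match last with
      | some v => v :: pvFillCol (some v) rest
      | none => cell :: pvFillCol none rest

def fill_data_down_all_columns_alt (data_rows : List (List String)) : List (List String) :=
  if data_rows = [] then []
  else
    let maxCols := (data_rows.map List.length).foldl max 0
    let grid := data_rows.map (fun row => row ++ List.replicate (maxCols - row.length) "")
    -- for c in range(max_cols): fill the column [grid[r][c] for r] (indices always in range)
    let newCols := (List.range maxCols).map (fun c => pvFillCol none (grid.map (fun row => row.getD c "")))
    -- [[new_cols[c][r] for c in range(max_cols)] for r in range(n_rows)]
    (List.range grid.length).map (fun r => newCols.map (fun col => col.getD r ""))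

-- ===== PRECONDITION & SPEC =====
def Spec_fill_data_down_all_columns (data_rows : List (List String)) (out : List (List String)) : Prop := out = fill_data_down_all_columns_alt data_rows
instance (data_rows : List (List String)) (out : List (List String)) : Decidable (Spec_fill_data_down_all_columns data_rows out) := by unfold Spec_fill_data_down_all_columns; infer_instance

-- ===== CLAIM (what is proved, stated in full; the proofs are below) =====
def Claim_equal_fill_data_down_all_columns : Prop := ∀ (data_rows : List (List String)), Dom_fill_data_down_all_columns data_rows → Spec_fill_data_down_all_columns data_rows (fill_data_down_all_columns data_rows)

-- ===== LEMMAS AND PROOFS =====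

-- pvFillCol unfolds one cell as one pvAStep
theorem pvFillCol_cons (lc : Option String) (x : String) (xs : List String) :
    pvFillCol lc (x :: xs) = (pvAStep x lc).1 :: pvFillCol (pvAStep x lc).2 xs := by
  cases lc <;> simp only [pvFillCol, pvAStep] <;> split_ifs <;> rfl

-- A's row pass, characterised pointwise
theorem pvARow_eq (row : List String) (last : List (Option String)) (h : row.length = last.length) :
    pvARow row last =
      ((List.range row.length).map (fun c => (pvAStep (row.getD c "") (last.getD c none)).1),
       (List.range row.length).map (fun c => (pvAStep (row.getD c "") (last.getD c none)).2)) := by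
  induction row generalizing last with
  | nil => simp [pvARow]
  | cons x xs ih =>
    cases last with
    | nil => simp at h
    | cons l ls =>
      simp only [List.length_cons] at h ⊢
      rw [List.range_succ_eq_map]
      simp only [pvARow, List.map_cons, List.map_map, Function.comp_def, List.getD_cons_zero,
        List.getD_cons_succ]
      rw [ih ls (by omega)]

theorem getD_map_range' {α : Type} (f : Nat → α) (m c : Nat) (d : α) (hc : c < m) :
    ((List.range m).map f).getD c d = f c := by
  simp [List.getD, hc]

-- main bridge: the row-major scan equals the column scans, reassembled by index
theorem pvARows_eq (m : Nat) (grid : List (List String)) (last : List (Option String))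
    (hg : ∀ row ∈ grid, row.length = m) (hl : last.length = m) :
    pvARows grid last =
      (List.range grid.length).map (fun r =>
        (List.range m).map (fun c =>
          (pvFillCol (last.getD c none) (grid.map (fun row => row.getD c ""))).getD r "")) := by
  induction grid generalizing last with
  | nil => simp [pvARows]
  | cons row rest ih =>
    have hrow : row.length = m := hg row (by simp)
    simp only [pvARows, List.length_cons]
    rw [List.range_succ_eq_map]
    simp only [List.map_cons, List.map_map, Function.comp_def]
    refine List.cons_eq_cons.mpr ⟨?_, ?_⟩
    · -- head row
      simp only [pvARow_eq row last (by rw [hrow, hl]), hrow]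
      refine List.map_congr_left (fun c hc => ?_)
      rw [List.mem_range] at hc
      rw [pvFillCol_cons, List.getD_cons_zero]
    · -- tail rows
      simp only [pvARow_eq row last (by rw [hrow, hl])]
      rw [ih ((List.range row.length).map (fun c => (pvAStep (row.getD c "") (last.getD c none)).2))
            (fun r hr => hg r (List.mem_cons_of_mem _ hr)) (by simp [hrow])]
      refine List.map_congr_left (fun r _ => ?_)
      refine List.map_congr_left (fun c hc => ?_)
      rw [List.mem_range] at hc
      rw [getD_map_range' _ row.length c none (by omega)]
      rw [pvFillCol_cons, List.getD_cons_succ]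

-- ===== VERDICT (by name: the statement is the Claim_ definition above) =====
theorem fill_data_down_all_columns_spec : Claim_equal_fill_data_down_all_columns := by
  intro data_rows _
  unfold Spec_fill_data_down_all_columns fill_data_down_all_columns fill_data_down_all_columns_alt
  by_cases hnil : data_rows = []
  · simp [hnil]
  · rw [if_neg hnil, if_neg hnil]
    have hg : ∀ row ∈ data_rows.map
        (fun row => row ++ List.replicate (((data_rows.map List.length).foldl max 0) - row.length) ""),
        row.length = (data_rows.map List.length).foldl max 0 := by
      intro row hr
      rcases List.mem_map.mp hr with ⟨r, hrmem, rfl⟩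
      have hle : r.length ≤ (data_rows.map List.length).foldl max 0 :=
        (PySem.List.le_foldl_max (data_rows.map List.length) 0).2 r.length
          (List.mem_map_of_mem hrmem)
      simp only [List.length_append, List.length_replicate]
      omega
    rw [pvARows_eq ((data_rows.map List.length).foldl max 0) _ _ hg (by simp)]
    simp only [List.map_map, Function.comp_def, List.getD_eq_getElem?_getD,
      List.getElem?_getD_replicate_default_eq]
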